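-- pv_equiv track=rewrite | github.com/ncusi/PatchScope | src/diffannotator/new_annotate.py | group_tokens_by_line
-- ===== SOURCE A (Python) =====
-- from collections import defaultdict, deque
-- from typing import List, Dict, Tuple, TypeVar
-- from typing import Iterable, Generator  # should be imported from collections.abc
--
-- T = TypeVar('T')
--
-- def line_ends_idx(text: str) -> List[int]:
--     """Return position+1 for each newline in text
--
--     This way each line can be extracted with text[pos[i-1]:pos[i]].
--
--     >>> text = "123\\n56\\n"
--     >>> line_ends_idx(text)
--     [4, 7]
--     >>> text[0:4]
--     '123\\n'
--     >>> text[4:7]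
--     '56\\n'
--
--     :param text: str to process
--     :return: list of positions after end of line characters
--     """
--     return [i for i, ch in enumerate(text, start=1)
--             if ch == '\n']
--
-- def group_tokens_by_line(code: str, tokens: Iterable[T]) -> Dict[int, List[T]]:
--     """Group tokens by line in code
--
--     For each line in the source `code`, find all `tokens` that belong
--     to that line, and group tokens by line.  **Note** that `tokens` must
--     be result of parsing `code`.
--
--     :param code: Source code text that was parsed into tokens
--     :param tokens: An iterable of (index, token_type, value) tuples,
--         preferably with `value` split into individual lines with the
--         help of `split_multiline_lex_tokens` function.
--     :return: mapping from line number in `code` to list of tokens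
--         in that line
--     """
--     tokens_deque = deque(tokens)
--     idx_code = line_ends_idx(code)
--
--     line_tokens = defaultdict(list)
--     for no, idx in enumerate(idx_code):
--         while tokens_deque:
--             token = tokens_deque.popleft()
--             if token[0] < idx:
--                 line_tokens[no].append(token)
--             else:
--                 tokens_deque.appendleft(token)
--                 break
--
--     return line_tokens
-- ===== SOURCE B (Python) =====
-- from collections import defaultdict, deque
--
--
-- def _line_ends(text):
--     return [i + 1 for i, ch in enumerate(text) if ch == '\n']
--
--
-- def group_tokens_by_line(code, tokens):
--     # One pass over the tokens with a monotone cursor over the line ends: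
--     # for each token, advance past the line ends it lies beyond, then file it
--     # under the current line (tokens past the last newline are dropped).
--     line_tokens = defaultdict(list)
--     rest = deque(_line_ends(code))
--     no = 0
--     for token in tokens:
--         while rest and token[0] >= rest[0]:
--             rest.popleft()
--             no += 1
--         if rest:
--             line_tokens[no].append(token)
--     return line_tokens
-- ===== Notes on version B (the rewrite author's own statement) =====
-- stated objective: alternative
-- what changed: Inverts the loop nesting: instead of iterating over line ends and popping tokens from a deque with push-back, B makes one pass over the tokens, advancing a monotone line cursor through the line-end positions, so the deque push-back trick disappears.
import Mathlib
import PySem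

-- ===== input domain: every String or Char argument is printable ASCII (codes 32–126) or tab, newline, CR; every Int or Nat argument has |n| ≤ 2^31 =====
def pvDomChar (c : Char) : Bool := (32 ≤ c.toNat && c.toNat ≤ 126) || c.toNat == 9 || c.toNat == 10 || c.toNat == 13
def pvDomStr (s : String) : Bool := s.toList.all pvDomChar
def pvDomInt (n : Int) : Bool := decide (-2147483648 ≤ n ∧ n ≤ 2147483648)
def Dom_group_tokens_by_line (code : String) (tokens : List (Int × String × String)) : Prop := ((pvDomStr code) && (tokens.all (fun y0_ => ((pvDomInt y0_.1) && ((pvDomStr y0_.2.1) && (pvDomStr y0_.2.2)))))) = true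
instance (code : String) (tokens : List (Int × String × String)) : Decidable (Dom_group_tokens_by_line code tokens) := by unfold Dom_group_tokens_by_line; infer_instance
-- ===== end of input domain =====

-- B groups the tokens in ONE pass with a monotone line cursor instead of A's
-- per-line deque popping with push-back; same return value, same cost class.

-- ===== PORT A =====
-- line_ends_idx: [i for i, ch in enumerate(text, start=1) if ch == '\n']
def pvLineEndsA (text : String) : List Int :=
  ((PySem.List.enumerate text.toList 1).filter (fun p => p.2 == '\n')).map (·.1)

-- the inner 'while tokens_deque: popleft; if token[0] < idx: append else: appendleft; break'
def pvConsumeA (idx : Int) (no : Int) :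
    List (Int × String × String) → PySem.Dict Int (List (Int × String × String)) →
    List (Int × String × String) × PySem.Dict Int (List (Int × String × String))
  | [], d => ([], d)
  | t :: ts, d =>
      if t.1 < idx then pvConsumeA idx no ts (d.modify no [] (· ++ [t]))
      else (t :: ts, d)

-- the outer 'for no, idx in enumerate(idx_code)'
def pvLinesLoopA :
    List Int → Int → List (Int × String × String) →
    PySem.Dict Int (List (Int × String × String)) →
    PySem.Dict Int (List (Int × String × String))
  | [], _, _, d => d
  | i :: is, no, toks, d =>
      let p := pvConsumeA i no toks d
      pvLinesLoopA is (no + 1) p.1 p.2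

def group_tokens_by_line (code : String) (tokens : List (Int × String × String)) : List (Int × List (Int × String × String)) :=
  (pvLinesLoopA (pvLineEndsA code) 0 tokens PySem.Dict.empty).items

-- ===== PORT B =====
-- _line_ends: [i + 1 for i, ch in enumerate(text) if ch == '\n']
def pvLineEndsB (text : String) : List Int :=
  ((PySem.List.enumerate text.toList 0).filter (fun p => p.2 == '\n')).map (fun p => p.1 + 1)

-- 'while rest and token[0] >= rest[0]: rest.popleft(); no += 1'
def pvAdvanceB (t0 : Int) : List Int → Int → List Int × Int
  | [], no => ([], no)
  | i :: is, no => if t0 ≥ i then pvAdvanceB t0 is (no + 1) else (i :: is, no)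

-- 'for token in tokens: advance; if rest: line_tokens[no].append(token)'
def pvTokLoopB :
    List (Int × String × String) → List Int → Int →
    PySem.Dict Int (List (Int × String × String)) →
    PySem.Dict Int (List (Int × String × String))
  | [], _, _, d => d
  | t :: ts, rest, no, d =>
      let p := pvAdvanceB t.1 rest no
      pvTokLoopB ts p.1 p.2 (if p.1 = [] then d else d.modify p.2 [] (· ++ [t]))

def group_tokens_by_line_alt (code : String) (tokens : List (Int × String × String)) : List (Int × List (Int × String × String)) :=
  (pvTokLoopB tokens (pvLineEndsB code) 0 PySem.Dict.empty).items

-- ===== PRECONDITION & SPEC =====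
def Spec_group_tokens_by_line (code : String) (tokens : List (Int × String × String)) (out : List (Int × List (Int × String × String))) : Prop := out = group_tokens_by_line_alt code tokens
instance (code : String) (tokens : List (Int × String × String)) (out : List (Int × List (Int × String × String))) : Decidable (Spec_group_tokens_by_line code tokens out) := by unfold Spec_group_tokens_by_line; infer_instance

-- ===== CLAIM (what is proved, stated in full; the proofs are below) =====
def Claim_equal_group_tokens_by_line : Prop := ∀ (code : String) (tokens : List (Int × String × String)), Dom_group_tokens_by_line code tokens → Spec_group_tokens_by_line code tokens (group_tokens_by_line code tokens)

-- ===== LEMMAS AND PROOFS =====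

-- the two line-end computations agree (start=1 vs +1 after start=0)
theorem pvLineEnds_eq_aux (xs : List Char) : ∀ (s : Int),
    ((PySem.List.enumerate xs (s + 1)).filter (fun p => p.2 == '\n')).map (·.1)
    = ((PySem.List.enumerate xs s).filter (fun p => p.2 == '\n')).map (fun p => p.1 + 1) := by
  induction xs with
  | nil => intro s; simp [PySem.List.enumerate_nil]
  | cons c cs ih =>
      intro s
      simp only [PySem.List.enumerate_cons, List.filter_cons]
      by_cases h : c = '\n'
      · simp [h, ih (s + 1)]
      · simp [h, ih (s + 1)]

theorem pvLineEnds_eq (text : String) : pvLineEndsA text = pvLineEndsB text := by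
  unfold pvLineEndsA pvLineEndsB
  have := pvLineEnds_eq_aux text.toList 0
  simpa using this

-- B's token loop does nothing once the line ends are exhausted
theorem pvTokLoopB_nil (ts : List (Int × String × String)) : ∀ (no : Int)
    (d : PySem.Dict Int (List (Int × String × String))),
    pvTokLoopB ts [] no d = d := by
  induction ts with
  | nil => intro no d; rfl
  | cons t ts ih => intro no d; simp [pvTokLoopB, pvAdvanceB, ih]

-- one line of A's outer loop = the tokens B consumes at that line
theorem pvTokLoopB_cons (toks : List (Int × String × String)) : ∀ (i : Int) (is : List Int)
    (no : Int) (d : PySem.Dict Int (List (Int × String × String))),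
    pvTokLoopB toks (i :: is) no d
      = pvTokLoopB (pvConsumeA i no toks d).1 is (no + 1) (pvConsumeA i no toks d).2 := by
  induction toks with
  | nil => intro i is no d; rfl
  | cons t ts ih =>
      intro i is no d
      by_cases h : t.1 < i
      · have h' : ¬ t.1 ≥ i := by omega
        simp only [pvTokLoopB, pvAdvanceB, if_neg h']
        simp only [pvConsumeA, if_pos h]
        exact ih i is no (d.modify no [] (· ++ [t]))
      · have h' : t.1 ≥ i := by omega
        simp only [pvConsumeA, if_neg h]
        show pvTokLoopB (t :: ts) (i :: is) no d = pvTokLoopB (t :: ts) is (no + 1) d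
        simp only [pvTokLoopB, pvAdvanceB, if_pos h']

theorem pvLoops_eq (L : List Int) : ∀ (toks : List (Int × String × String)) (no : Int)
    (d : PySem.Dict Int (List (Int × String × String))),
    pvLinesLoopA L no toks d = pvTokLoopB toks L no d := by
  induction L with
  | nil => intro toks no d; exact (pvTokLoopB_nil toks no d).symm
  | cons i is ih =>
      intro toks no d
      rw [pvTokLoopB_cons toks i is no d]
      simp only [pvLinesLoopA]
      exact ih _ _ _

-- ===== VERDICT (by name: the statement is the Claim_ definition above) =====
theorem group_tokens_by_line_spec : Claim_equal_group_tokens_by_line := by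
  intro code tokens _
  show group_tokens_by_line code tokens = group_tokens_by_line_alt code tokens
  unfold group_tokens_by_line group_tokens_by_line_alt
  rw [pvLineEnds_eq, pvLoops_eq]
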